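-- pv_equiv track=rewrite | github.com/theodm/gender-assistenz | word_usage_analyzer/igw.py | _find_binnenI_pos
-- ===== SOURCE A (Python) =====
-- def _find_binnenI_pos(word_text):
--     # aber: Nur solche I, die kein '-' als vorheriges Zeichen haben,
--     # da es sich dann vermutlich um ein zusammengesetztes Nomen,
--     # nicht um ein Binnen-I handelt.
--     pos = -1
--     while True:
--         pos = word_text.find('I', pos + 1)
--
--         if pos == -1:
--             break
--
--         if pos > 0 and word_text[pos - 1] != '-':
--             return pos
--
--     return pos
-- ===== SOURCE B (Python) =====
-- def _find_binnenI_pos(word_text):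
--     # Single pass over adjacent character pairs: the first 'I' (at index >= 1)
--     # whose preceding character is not '-'.
--     return next((i for i, (prev, ch) in enumerate(zip(word_text, word_text[1:]), 1)
--                  if ch == 'I' and prev != '-'), -1)
-- ===== Notes on version B (the rewrite author's own statement) =====
-- stated objective: idiomatic
-- what changed: Replaces the while-loop of repeated str.find calls with guarded index arithmetic by a single generator pass over adjacent character pairs (enumerate(zip(s, s[1:]), 1) with next(..., -1)).
import Mathlib
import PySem

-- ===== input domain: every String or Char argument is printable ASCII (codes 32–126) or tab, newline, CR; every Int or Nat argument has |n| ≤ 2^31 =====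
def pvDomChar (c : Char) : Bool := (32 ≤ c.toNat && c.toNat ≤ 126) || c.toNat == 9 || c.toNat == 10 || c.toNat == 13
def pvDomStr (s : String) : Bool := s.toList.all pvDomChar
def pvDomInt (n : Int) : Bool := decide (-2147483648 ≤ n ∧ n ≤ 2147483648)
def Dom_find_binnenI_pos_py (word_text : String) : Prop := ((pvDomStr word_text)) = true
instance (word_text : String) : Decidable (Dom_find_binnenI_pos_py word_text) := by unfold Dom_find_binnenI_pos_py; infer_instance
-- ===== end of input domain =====

-- B replaces A's while-loop of repeated str.find calls by a single pass over
-- adjacent character pairs (idiomatic; same linear cost).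


-- ===== PORT A =====
-- helper lemmas cited by the port's invariant/termination proofs
theorem pvPrefixSingleton (c : Char) (xs : List Char) :
    [c] <+: xs ↔ xs.head? = some c := by
  cases xs <;> simp [List.cons_prefix_cons, eq_comm]

theorem pvPrefixSingletonDrop (l : List Char) (c : Char) (j : Nat) :
    [c] <+: l.drop j ↔ l[j]? = some c := by
  rw [pvPrefixSingleton, List.head?_drop]

theorem pvFindStep (w : String) (k : Nat) (hk : k ≤ w.toList.length)
    (hne : PySem.Str.findFrom w "I" (k : Int) ≠ -1) :
    (k : Int) ≤ PySem.Str.findFrom w "I" (k : Int) ∧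
      (PySem.Str.findFrom w "I" (k : Int)).toNat < w.toList.length ∧
      w.toList[(PySem.Str.findFrom w "I" (k : Int)).toNat]? = some 'I' ∧
      ∀ i, k ≤ i → i < (PySem.Str.findFrom w "I" (k : Int)).toNat →
        w.toList[i]? ≠ some 'I' := by
  have hI : "I".toList = ['I'] := rfl
  rw [PySem.Str.findFrom_eq, hI] at hne ⊢
  obtain ⟨h1, h2, h3⟩ := PySem.Chars.findFrom_natCast_spec w.toList ['I'] k hk hne
  have hat := (pvPrefixSingletonDrop w.toList 'I' _).mp h2
  refine ⟨h1, (List.getElem?_eq_some_iff.mp hat).1, hat, ?_⟩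
  intro i hki hi hcontra
  exact h3 i hki hi ((pvPrefixSingletonDrop w.toList 'I' i).mpr hcontra)

-- the while-loop of A; pos is the Python loop variable, h the loop invariant
def find_binnenI_pos_loop (w : String) (pos : Int)
    (h : 0 ≤ pos + 1 ∧ (pos + 1).toNat ≤ w.toList.length) : Int :=
  let p := PySem.Str.findFrom w "I" (pos + 1)
  if hp : p = -1 then p
  else if 0 < p ∧ PySem.Str.pyGet? w (p - 1) ≠ some '-' then p
  else
    find_binnenI_pos_loop w p (by
      have h0 : ((pos + 1).toNat : Int) = pos + 1 := Int.toNat_of_nonneg h.1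
      have hb := pvFindStep w (pos + 1).toNat h.2 (by rw [h0]; exact hp)
      rw [h0] at hb
      exact ⟨by omega, by omega⟩)
termination_by w.toList.length - (pos + 1).toNat
decreasing_by
  have h0 : ((pos + 1).toNat : Int) = pos + 1 := Int.toNat_of_nonneg h.1
  have hb := pvFindStep w (pos + 1).toNat h.2 (by rw [h0]; exact hp)
  rw [h0] at hb
  omega

def find_binnenI_pos_py (word_text : String) : Int :=
  find_binnenI_pos_loop word_text (-1) ⟨by norm_num, by simp⟩

-- ===== PORT B =====
-- next((i for i,(prev,ch) in enumerate(zip(s, s[1:]), 1) if ch=='I' and prev!='-'), -1)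
def altScanB : Int → List (Char × Char) → Int
  | _, [] => -1
  | i, (prev, ch) :: rest => if ch = 'I' ∧ prev ≠ '-' then i else altScanB (i + 1) rest

def find_binnenI_pos_py_alt (word_text : String) : Int :=
  altScanB 1 (word_text.toList.zip word_text.toList.tail)

-- ===== PRECONDITION & SPEC =====
def Spec_find_binnenI_pos_py (word_text : String) (out : Int) : Prop := out = find_binnenI_pos_py_alt word_text
instance (word_text : String) (out : Int) : Decidable (Spec_find_binnenI_pos_py word_text out) := by unfold Spec_find_binnenI_pos_py; infer_instance

-- ===== CLAIM (what is proved, stated in full; the proofs are below) =====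
def Claim_equal_find_binnenI_pos_py : Prop := ∀ (word_text : String), Dom_find_binnenI_pos_py word_text → Spec_find_binnenI_pos_py word_text (find_binnenI_pos_py word_text)

-- ===== LEMMAS AND PROOFS =====

-- "index i is a Binnen-I position": i ≥ 1, an 'I', and no '-' before it
def GoodAt (l : List Char) (i : Nat) : Prop :=
  1 ≤ i ∧ i < l.length ∧ l[i]? = some 'I' ∧ l[i - 1]? ≠ some '-'

-- first good index ≥ k, else -1 (proof-side reference function)
def firstGood (l : List Char) (k : Nat) : Int :=
  if hk : k < l.length then
    if 1 ≤ k ∧ l[k]? = some 'I' ∧ l[k - 1]? ≠ some '-' then (k : Int)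
    else firstGood l (k + 1)
  else -1
termination_by l.length - k

theorem firstGood_ge_len (l : List Char) (k : Nat) (h : ¬ k < l.length) :
    firstGood l k = -1 := by rw [firstGood]; simp [h]

theorem firstGood_congr (l : List Char) (k m : Nat) (hkm : k ≤ m)
    (h : ∀ j, k ≤ j → j < m → ¬ GoodAt l j) : firstGood l k = firstGood l m := by
  by_cases hk : k = m
  · rw [hk]
  · have hlt : k < m := by omega
    by_cases hkl : k < l.length
    · have hng : ¬ GoodAt l k := h k le_rfl hlt
      rw [firstGood]
      simp only [hkl, dif_pos]
      rw [if_neg (by unfold GoodAt at hng; tauto)]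
      exact firstGood_congr l (k + 1) m (by omega) (fun j h1 h2 => h j (by omega) h2)
    · rw [firstGood_ge_len l k hkl, firstGood_ge_len l m (by omega)]
termination_by m - k

theorem firstGood_at (l : List Char) (m : Nat) (hg : GoodAt l m) :
    firstGood l m = (m : Int) := by
  obtain ⟨h1, h2, h3, h4⟩ := hg
  rw [firstGood, dif_pos h2, if_pos ⟨h1, h3, h4⟩]

theorem loop_eq_firstGood (w : String) (pos : Int)
    (h : 0 ≤ pos + 1 ∧ (pos + 1).toNat ≤ w.toList.length) :
    find_binnenI_pos_loop w pos h = firstGood w.toList (pos + 1).toNat := by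
  rw [find_binnenI_pos_loop]
  set k := (pos + 1).toNat with hkdef
  clear_value k
  have h0 : (k : Int) = pos + 1 := by rw [hkdef]; exact Int.toNat_of_nonneg h.1
  by_cases hp : PySem.Str.findFrom w "I" (pos + 1) = -1
  · -- no further 'I': no good index ≥ k
    have hfg : firstGood w.toList k = -1 := by
      rw [firstGood_congr w.toList k w.toList.length h.2 ?_,
        firstGood_ge_len w.toList w.toList.length (by omega)]
      intro j hkj hjl hg
      obtain ⟨-, -, h3, -⟩ := hg
      rw [PySem.Str.findFrom_eq, show "I".toList = ['I'] from rfl, ← h0] at hp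
      have hno := (PySem.Chars.findFrom_natCast_eq_neg_one_iff w.toList ['I'] k h.2).mp hp
      have h5 : ['I'] <+: (w.toList.drop k).drop (j - k) := by
        rw [List.drop_drop, show k + (j - k) = j by omega]
        exact (pvPrefixSingletonDrop w.toList 'I' j).mpr h3
      exact hno (h5.isInfix.trans (List.drop_suffix (j - k) (w.toList.drop k)).isInfix)
    rw [dif_pos hp, hp, hfg]
  · have hb := pvFindStep w k h.2 (by rw [h0]; exact hp)
    rw [h0] at hb
    obtain ⟨hb1, hb2, hb3, hb4⟩ := hb
    have hprev : 0 < PySem.Str.findFrom w "I" (pos + 1) →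
        PySem.Str.pyGet? w (PySem.Str.findFrom w "I" (pos + 1) - 1)
          = w.toList[(PySem.Str.findFrom w "I" (pos + 1)).toNat - 1]? := by
      intro hpos
      rw [show PySem.Str.findFrom w "I" (pos + 1) - 1
          = (((PySem.Str.findFrom w "I" (pos + 1)).toNat - 1 : Nat) : Int) by omega]
      exact PySem.Str.pyGet?_natCast w ((PySem.Str.findFrom w "I" (pos + 1)).toNat - 1)
    have hnotI : ∀ j, k ≤ j → j < (PySem.Str.findFrom w "I" (pos + 1)).toNat →
        ¬ GoodAt w.toList j := by
      intro j h1 h2 hg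
      exact hb4 j h1 h2 hg.2.2.1
    by_cases hc : 0 < PySem.Str.findFrom w "I" (pos + 1) ∧
        PySem.Str.pyGet? w (PySem.Str.findFrom w "I" (pos + 1) - 1) ≠ some '-'
    · -- found: this position is the first good index ≥ k
      rw [dif_neg hp, if_pos hc]
      have hg : GoodAt w.toList (PySem.Str.findFrom w "I" (pos + 1)).toNat :=
        ⟨by omega, hb2, hb3, by rw [← hprev hc.1]; exact hc.2⟩
      have hfg : firstGood w.toList k = PySem.Str.findFrom w "I" (pos + 1) := by
        rw [firstGood_congr w.toList k (PySem.Str.findFrom w "I" (pos + 1)).toNat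
          (by omega) hnotI, firstGood_at _ _ hg]
        omega
      exact hfg.symm
    · -- an 'I' here but not a Binnen-I: skip past it and continue
      rw [dif_neg hp, if_neg hc,
        loop_eq_firstGood w (PySem.Str.findFrom w "I" (pos + 1)) ⟨by omega, by omega⟩]
      have hskip : ∀ j, k ≤ j → j < (PySem.Str.findFrom w "I" (pos + 1)).toNat + 1 →
          ¬ GoodAt w.toList j := by
        intro j h1 h2 hg
        by_cases hj : j = (PySem.Str.findFrom w "I" (pos + 1)).toNat
        · subst hj
          obtain ⟨g1, -, -, g4⟩ := hg
          exact hc ⟨by omega, by rw [hprev (by omega)]; exact g4⟩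
        · exact hnotI j h1 (by omega) hg
      rw [show (PySem.Str.findFrom w "I" (pos + 1) + 1).toNat
          = (PySem.Str.findFrom w "I" (pos + 1)).toNat + 1 by omega]
      exact (firstGood_congr w.toList k
        ((PySem.Str.findFrom w "I" (pos + 1)).toNat + 1) (by omega) hskip).symm
termination_by w.toList.length - (pos + 1).toNat
decreasing_by
  have h0' : ((pos + 1).toNat : Int) = pos + 1 := Int.toNat_of_nonneg h.1
  have hb' := pvFindStep w (pos + 1).toNat h.2 (by rw [h0']; exact hp)
  rw [h0'] at hb'
  omega

theorem altScanB_eq (l : List Char) (k : Nat) :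
    altScanB ((k : Int) + 1) ((l.drop k).zip (l.drop (k + 1))) = firstGood l (k + 1) := by
  by_cases hk : k < l.length
  · rw [List.drop_eq_getElem_cons hk]
    by_cases hk1 : k + 1 < l.length
    · rw [List.drop_eq_getElem_cons hk1]
      simp only [List.zip_cons_cons, altScanB]
      rw [firstGood]
      simp only [hk1, dif_pos]
      have e1 : l[k + 1]? = some l[k + 1] := List.getElem?_eq_getElem hk1
      have e2 : l[k + 1 - 1]? = some l[k] := by
        simp only [Nat.add_sub_cancel]; exact List.getElem?_eq_getElem hk
      by_cases hc : l[k + 1] = 'I' ∧ l[k] ≠ '-'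
      · rw [if_pos hc, if_pos ⟨by omega, by rw [e1, hc.1], by
          rw [e2]; intro hcon; exact hc.2 (Option.some_injective _ hcon)⟩]
        omega
      · rw [if_neg hc, if_neg (by
          rw [e1, e2]
          rintro ⟨-, c2, c3⟩
          exact hc ⟨Option.some_injective _ c2, fun he => c3 (by rw [he])⟩)]
        rw [show ((k : Int) + 1 + 1) = (((k + 1 : Nat) : Int) + 1) by push_cast; ring]
        have hrec := altScanB_eq l (k + 1)
        rw [List.drop_eq_getElem_cons hk1] at hrec
        exact hrec
    · have hnil : l.drop (k + 1) = [] := List.drop_eq_nil_of_le (by omega)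
      rw [hnil]
      simp [altScanB, firstGood_ge_len l (k + 1) hk1]
  · have h1 : l.drop k = [] := List.drop_eq_nil_of_le (by omega)
    rw [h1]
    simp [altScanB, firstGood_ge_len l (k + 1) (by omega)]
termination_by l.length - k

-- ===== VERDICT (by name: the statement is the Claim_ definition above) =====
theorem find_binnenI_pos_py_spec : Claim_equal_find_binnenI_pos_py := by
  intro w _
  unfold Spec_find_binnenI_pos_py find_binnenI_pos_py find_binnenI_pos_py_alt
  rw [loop_eq_firstGood]
  rw [show ((-1 : Int) + 1).toNat = 0 by norm_num]
  have hB := altScanB_eq w.toList 0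
  simp only [Nat.cast_zero, zero_add, List.drop_zero] at hB
  rw [show w.toList.tail = w.toList.drop 1 from List.drop_one.symm, hB]
  exact firstGood_congr w.toList 0 1 (by omega) (by
    intro j h1 h2 hg
    have : j = 0 := by omega
    subst this
    exact absurd hg.1 (by omega))
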